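-- pv_equiv track=rewrite | github.com/Safaet-Rabbi/Python | Codeforce/672B.py | min_changes_for_distinct_substrings
-- ===== SOURCE A (Python) =====
-- def min_changes_for_distinct_substrings(n, s):
--     if n > 26:
--         return -1
--     from collections import Counter
--     freq = Counter(s)
--     changes_needed = 0
--
--     for count in freq.values():
--         if count > 1:
--             changes_needed += count - 1
--
--     return changes_needed
-- ===== SOURCE B (Python) =====
-- def min_changes_for_distinct_substrings(n, s):
--     if n > 26:
--         return -1
--     t = sorted(s)
--     return sum(a == b for a, b in zip(t, t[1:]))
-- ===== Notes on version B (the rewrite author's own statement) =====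
-- stated objective: alternative
-- what changed: Replaces the Counter frequency table and the loop summing count-1 by sort-then-scan: sort the characters and count adjacent equal pairs, each duplicate occurrence contributing exactly one pair.
import Mathlib
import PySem

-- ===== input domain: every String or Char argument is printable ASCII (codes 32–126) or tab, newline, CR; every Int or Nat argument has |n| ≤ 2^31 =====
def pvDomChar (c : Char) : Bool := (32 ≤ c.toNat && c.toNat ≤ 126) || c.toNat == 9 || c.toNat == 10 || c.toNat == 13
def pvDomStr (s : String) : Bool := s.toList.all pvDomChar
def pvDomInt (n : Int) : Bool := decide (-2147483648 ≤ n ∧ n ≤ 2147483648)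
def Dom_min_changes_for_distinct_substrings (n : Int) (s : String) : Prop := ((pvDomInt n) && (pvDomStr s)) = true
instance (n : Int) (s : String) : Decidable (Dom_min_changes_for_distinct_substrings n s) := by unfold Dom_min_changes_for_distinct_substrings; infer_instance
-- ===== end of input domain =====

-- B replaces A's Counter + per-character accumulation by sort-then-scan: sort the characters
-- and count adjacent equal pairs; objective: alternative (different algorithm, similar cost).

-- ===== PORT A =====
def min_changes_for_distinct_substrings (n : Int) (s : String) : Int :=
  if n > 26 then -1
  else
    let freq : PySem.Dict Char Int := PySem.Dict.counter s.toList
    freq.values.foldl (fun changes count => if count > 1 then changes + (count - 1) else changes) 0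

-- ===== PORT B =====
def min_changes_for_distinct_substrings_alt (n : Int) (s : String) : Int :=
  if n > 26 then -1
  else
    let t := PySem.List.sorted s.toList (fun c => c) false
    ((t.zip (PySem.List.slice t (some 1) none)).countP (fun p => p.1 == p.2) : Int)

-- ===== PRECONDITION & SPEC =====
def Spec_min_changes_for_distinct_substrings (n : Int) (s : String) (out : Int) : Prop := out = min_changes_for_distinct_substrings_alt n s
instance (n : Int) (s : String) (out : Int) : Decidable (Spec_min_changes_for_distinct_substrings n s out) := by unfold Spec_min_changes_for_distinct_substrings; infer_instance

-- ===== CLAIM (what is proved, stated in full; the proofs are below) =====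
def Claim_equal_min_changes_for_distinct_substrings : Prop := ∀ (n : Int) (s : String), Dom_min_changes_for_distinct_substrings n s → Spec_min_changes_for_distinct_substrings n s (min_changes_for_distinct_substrings n s)

-- ===== LEMMAS AND PROOFS =====

-- A's accumulation loop in closed form: with every count ≥ 1 it adds Σ count − #counts.
theorem pv_foldl_changes (cs : List Int) (a : Int) (h : ∀ c ∈ cs, 1 ≤ c) :
    cs.foldl (fun changes count => if count > 1 then changes + (count - 1) else changes) a
      = a + cs.sum - cs.length := by
  induction cs generalizing a with
  | nil => simp
  | cons c cs ih =>
    have hc : 1 ≤ c := h c (by simp)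
    have := ih (if c > 1 then a + (c - 1) else a) (fun x hx => h x (by simp [hx]))
    simp only [List.foldl_cons, List.sum_cons, List.length_cons] at *
    rw [this]
    split_ifs with hgt
    · push_cast; ring
    · have : c = 1 := le_antisymm (by omega) hc
      subst this; push_cast; ring

-- set(s) is a permutation of Mathlib's dedup (both nodup, same members).
theorem pv_ofList_perm_dedup {α : Type} [DecidableEq α] (l : List α) :
    (PySem.Set.ofList l).Perm l.dedup := by
  rw [List.perm_ext_iff_of_nodup (PySem.Set.nodup_ofList l) l.nodup_dedup]
  intro a
  rw [PySem.Set.mem_ofList, List.mem_dedup]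

-- Σ over set(s) of the multiplicities recovers the length.
theorem pv_sum_counts {α : Type} [DecidableEq α] (l : List α) :
    ((PySem.Set.ofList l).map (fun k => (l.count k : Int))).sum = (l.length : Int) := by
  have hperm := (pv_ofList_perm_dedup l).map (fun k => (l.count k : Int))
  rw [hperm.sum_eq]
  have h0 := List.sum_map_count_dedup_eq_length l
  have : ((l.dedup.map fun x => l.count x).sum : Int) = (l.length : Int) := by
    exact_mod_cast congrArg (Nat.cast (R := Int)) h0
  rw [← this]
  simp [List.map_map, Function.comp_def]

-- B's scan in closed form: in a ≤-sorted list the number of adjacent equal pairs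
-- is length minus the number of distinct elements.
theorem pv_adj_count_sorted (t : List Char) (hs : t.Pairwise (· ≤ ·)) :
    (t.zip t.tail).countP (fun p => p.1 == p.2) = t.length - t.dedup.length := by
  induction t with
  | nil => simp
  | cons a t ih =>
    cases t with
    | nil => simp
    | cons b r =>
      have hab : a ≤ b := (List.pairwise_cons.mp hs).1 b (by simp)
      have hmem : a ∈ b :: r ↔ a = b := by
        constructor
        · intro h
          rcases List.mem_cons.mp h with h | h
          · exact h
          · have hbr : b ≤ a :=
              ((List.pairwise_cons.mp (List.pairwise_cons.mp hs).2).1) a h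
            exact le_antisymm hab hbr
        · intro h; simp [h]
      have htail := ih (List.pairwise_cons.mp hs).2
      simp only [List.tail_cons] at htail
      have hdle : (b :: r).dedup.length ≤ (b :: r).length :=
        (List.dedup_sublist (b :: r)).length_le
      simp only [List.length_cons] at hdle htail
      by_cases h : a = b
      · have hdd : (a :: b :: r).dedup.length = (b :: r).dedup.length := by
          rw [List.dedup_cons, if_pos (hmem.mpr h)]
        simp only [List.tail_cons, List.zip_cons_cons, List.countP_cons]
        rw [htail, hdd]
        simp only [h, BEq.rfl, if_true, List.length_cons]
        omega
      · have hdd : (a :: b :: r).dedup.length = (b :: r).dedup.length + 1 := by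
          rw [List.dedup_cons, if_neg (fun hm => h (hmem.mp hm))]
          rfl
        simp only [List.tail_cons, List.zip_cons_cons, List.countP_cons]
        rw [htail, hdd]
        have hne : ¬ (a == b) = true := by simpa using h
        rw [if_neg hne]
        simp only [List.length_cons]
        omega

-- ===== VERDICT (by name: the statement is the Claim_ definition above) =====
theorem min_changes_for_distinct_substrings_spec : Claim_equal_min_changes_for_distinct_substrings := by
  intro n s _
  unfold Spec_min_changes_for_distinct_substrings min_changes_for_distinct_substrings
    min_changes_for_distinct_substrings_alt
  split_ifs with hn
  · rfl
  · set l := s.toList with hl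
    -- A's side equals (len l) - (dedup len)
    have hvals : (PySem.Dict.counter l : PySem.Dict Char Int).values
        = (PySem.Set.ofList l).map (fun k => (l.count k : Int)) := by
      show (((PySem.Dict.counter l : PySem.Dict Char Int)).items.map (·.2))
          = (PySem.Set.ofList l).map (fun k => (l.count k : Int))
      rw [PySem.Dict.items_counter]
      simp [List.map_map, Function.comp_def]
    have hA : List.foldl (fun changes count => if count > 1 then changes + (count - 1) else changes) 0
        (PySem.Dict.counter l : PySem.Dict Char Int).values
        = (l.length : Int) - (l.dedup.length : Int) := by
      rw [hvals, pv_foldl_changes]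
      · rw [pv_sum_counts]
        have := (pv_ofList_perm_dedup l).length_eq
        simp [this]
      · intro c hc
        simp only [List.mem_map] at hc
        obtain ⟨k, hk, rfl⟩ := hc
        have : k ∈ l := (PySem.Set.mem_ofList l k).mp hk
        have : 0 < l.count k := List.count_pos_iff.mpr this
        omega
    -- B's side equals the same value
    set t := PySem.List.sorted l (fun c => c) false with ht
    have hperm : t.Perm l := PySem.List.sorted_perm l (fun c => c) false
    have hpw : t.Pairwise (· ≤ ·) := PySem.List.sorted_pairwise l (fun c => c)
    have hdedup : t.dedup.length = l.dedup.length := hperm.dedup.length_eq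
    have hdle : t.dedup.length ≤ t.length := (List.dedup_sublist t).length_le
    have hB : ((t.zip (PySem.List.slice t (some 1) none)).countP (fun p => p.1 == p.2) : Int)
        = (l.length : Int) - (l.dedup.length : Int) := by
      rw [PySem.List.slice_from_one, pv_adj_count_sorted t hpw]
      rw [← hdedup, ← hperm.length_eq]
      omega
    change List.foldl _ 0 (PySem.Dict.counter l : PySem.Dict Char Int).values = _
    rw [hA]
    exact hB.symm
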